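-- pv_equiv track=rewrite | github.com/sishimoto/TimeTracking | timereaper/classifier.py | _get_app_category
-- ===== SOURCE A (Python) =====
-- def _get_app_category(app_name: str) -> str:
--     """アプリ名からカテゴリを推定"""
--     categories = {
--         "development": [
--             "Visual Studio Code", "Code", "IntelliJ IDEA", "PyCharm",
--             "WebStorm", "Xcode", "Terminal", "iTerm2", "iTerm",
--             "Warp", "Alacritty", "Hyper", "Cursor",
--         ],
--         "browser": [
--             "Google Chrome", "Safari", "Firefox", "Arc",
--             "Microsoft Edge", "Brave Browser", "Opera",
--         ],
--         "communication": [
--             "Slack", "Microsoft Teams", "Zoom", "Discord",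
--             "FaceTime", "Messages", "LINE", "Telegram",
--         ],
--         "design": [
--             "Figma", "Sketch", "Adobe Photoshop", "Adobe Illustrator",
--             "Adobe XD", "Affinity Designer", "Canva",
--         ],
--         "documentation": [
--             "Notion", "Microsoft Word", "Google Docs",
--             "Pages", "Obsidian", "Bear", "Craft",
--         ],
--         "productivity": [
--             "Finder", "Preview", "Calendar", "Reminders",
--             "Notes", "Spotlight",
--         ],
--         "media": [
--             "Spotify", "Music", "YouTube", "VLC",
--             "QuickTime Player",
--         ],
--     }
--
--     for category, apps in categories.items():
--         if app_name in apps: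
--             return category
--     return "other"
-- ===== SOURCE B (Python) =====
-- # Flat literal lookup table: app name -> category (written out directly,
-- # no nested category lists and no scan).
-- _APP_CATEGORY = {
--     'Visual Studio Code': 'development',
--     'Code': 'development',
--     'IntelliJ IDEA': 'development',
--     'PyCharm': 'development',
--     'WebStorm': 'development',
--     'Xcode': 'development',
--     'Terminal': 'development',
--     'iTerm2': 'development',
--     'iTerm': 'development',
--     'Warp': 'development',
--     'Alacritty': 'development',
--     'Hyper': 'development',
--     'Cursor': 'development',
--     'Google Chrome': 'browser',
--     'Safari': 'browser',
--     'Firefox': 'browser',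
--     'Arc': 'browser',
--     'Microsoft Edge': 'browser',
--     'Brave Browser': 'browser',
--     'Opera': 'browser',
--     'Slack': 'communication',
--     'Microsoft Teams': 'communication',
--     'Zoom': 'communication',
--     'Discord': 'communication',
--     'FaceTime': 'communication',
--     'Messages': 'communication',
--     'LINE': 'communication',
--     'Telegram': 'communication',
--     'Figma': 'design',
--     'Sketch': 'design',
--     'Adobe Photoshop': 'design',
--     'Adobe Illustrator': 'design',
--     'Adobe XD': 'design',
--     'Affinity Designer': 'design',
--     'Canva': 'design',
--     'Notion': 'documentation',
--     'Microsoft Word': 'documentation',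
--     'Google Docs': 'documentation',
--     'Pages': 'documentation',
--     'Obsidian': 'documentation',
--     'Bear': 'documentation',
--     'Craft': 'documentation',
--     'Finder': 'productivity',
--     'Preview': 'productivity',
--     'Calendar': 'productivity',
--     'Reminders': 'productivity',
--     'Notes': 'productivity',
--     'Spotlight': 'productivity',
--     'Spotify': 'media',
--     'Music': 'media',
--     'YouTube': 'media',
--     'VLC': 'media',
--     'QuickTime Player': 'media',
-- }
--
--
-- def _get_app_category(app_name: str) -> str:
--     """アプリ名からカテゴリを推定"""
--     return _APP_CATEGORY.get(app_name, "other")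
-- ===== Notes on version B (the rewrite author's own statement) =====
-- stated objective: idiomatic
-- what changed: Replaced A's nested categories dict and per-call scan over each category's app list with a single flat literal table app->category and one dict lookup with default 'other' (no duplicate app names exist, so first-match and table lookup coincide).
import Mathlib
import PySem

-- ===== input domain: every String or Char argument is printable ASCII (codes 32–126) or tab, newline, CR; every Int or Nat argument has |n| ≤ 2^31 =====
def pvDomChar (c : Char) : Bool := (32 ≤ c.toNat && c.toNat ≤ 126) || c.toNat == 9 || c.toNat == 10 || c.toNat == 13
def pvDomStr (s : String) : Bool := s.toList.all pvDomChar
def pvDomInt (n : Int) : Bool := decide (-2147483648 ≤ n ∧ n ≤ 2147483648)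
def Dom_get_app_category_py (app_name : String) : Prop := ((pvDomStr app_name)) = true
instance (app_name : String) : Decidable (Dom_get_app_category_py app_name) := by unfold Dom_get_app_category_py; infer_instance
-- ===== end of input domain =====

-- B replaces A's per-call scan over nested category lists with a single flat
-- literal lookup table app -> category; objective: idiomatic.

-- ===== PORT A =====
-- A's literal categories dict (insertion order).
def pvCategories : List (String × List String) :=
  [ ("development",
      ["Visual Studio Code", "Code", "IntelliJ IDEA", "PyCharm",
       "WebStorm", "Xcode", "Terminal", "iTerm2", "iTerm",
       "Warp", "Alacritty", "Hyper", "Cursor"]),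
    ("browser",
      ["Google Chrome", "Safari", "Firefox", "Arc",
       "Microsoft Edge", "Brave Browser", "Opera"]),
    ("communication",
      ["Slack", "Microsoft Teams", "Zoom", "Discord",
       "FaceTime", "Messages", "LINE", "Telegram"]),
    ("design",
      ["Figma", "Sketch", "Adobe Photoshop", "Adobe Illustrator",
       "Adobe XD", "Affinity Designer", "Canva"]),
    ("documentation",
      ["Notion", "Microsoft Word", "Google Docs",
       "Pages", "Obsidian", "Bear", "Craft"]),
    ("productivity",
      ["Finder", "Preview", "Calendar", "Reminders",
       "Notes", "Spotlight"]),
    ("media",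
      ["Spotify", "Music", "YouTube", "VLC",
       "QuickTime Player"]) ]

-- A's early-return loop over categories.items(): first category whose list contains app_name.
def pvScanA (app_name : String) : List (String × List String) → String
  | [] => "other"
  | (category, apps) :: rest =>
      if app_name ∈ apps then category else pvScanA app_name rest

def get_app_category_py (app_name : String) : String :=
  pvScanA app_name pvCategories

-- ===== PORT B =====
-- B's flat literal table _APP_CATEGORY : app name -> category (a dict literal).
def pvAppCategory : PySem.Dict String String :=
  PySem.Dict.mk [
    ("Visual Studio Code", "development"),
    ("Code", "development"),
    ("IntelliJ IDEA", "development"),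
    ("PyCharm", "development"),
    ("WebStorm", "development"),
    ("Xcode", "development"),
    ("Terminal", "development"),
    ("iTerm2", "development"),
    ("iTerm", "development"),
    ("Warp", "development"),
    ("Alacritty", "development"),
    ("Hyper", "development"),
    ("Cursor", "development"),
    ("Google Chrome", "browser"),
    ("Safari", "browser"),
    ("Firefox", "browser"),
    ("Arc", "browser"),
    ("Microsoft Edge", "browser"),
    ("Brave Browser", "browser"),
    ("Opera", "browser"),
    ("Slack", "communication"),
    ("Microsoft Teams", "communication"),
    ("Zoom", "communication"),
    ("Discord", "communication"),
    ("FaceTime", "communication"),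
    ("Messages", "communication"),
    ("LINE", "communication"),
    ("Telegram", "communication"),
    ("Figma", "design"),
    ("Sketch", "design"),
    ("Adobe Photoshop", "design"),
    ("Adobe Illustrator", "design"),
    ("Adobe XD", "design"),
    ("Affinity Designer", "design"),
    ("Canva", "design"),
    ("Notion", "documentation"),
    ("Microsoft Word", "documentation"),
    ("Google Docs", "documentation"),
    ("Pages", "documentation"),
    ("Obsidian", "documentation"),
    ("Bear", "documentation"),
    ("Craft", "documentation"),
    ("Finder", "productivity"),
    ("Preview", "productivity"),
    ("Calendar", "productivity"),
    ("Reminders", "productivity"),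
    ("Notes", "productivity"),
    ("Spotlight", "productivity"),
    ("Spotify", "media"),
    ("Music", "media"),
    ("YouTube", "media"),
    ("VLC", "media"),
    ("QuickTime Player", "media") ]

-- _APP_CATEGORY.get(app_name, "other")
def get_app_category_py_alt (app_name : String) : String :=
  pvAppCategory.getD app_name "other"

-- ===== PRECONDITION & SPEC =====
def Spec_get_app_category_py (app_name : String) (out : String) : Prop := out = get_app_category_py_alt app_name
instance (app_name : String) (out : String) : Decidable (Spec_get_app_category_py app_name out) := by unfold Spec_get_app_category_py; infer_instance

-- ===== CLAIM =====
def Claim_equal_get_app_category_py : Prop := ∀ (app_name : String), Dom_get_app_category_py app_name → Spec_get_app_category_py app_name (get_app_category_py app_name)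

-- ===== LEMMAS AND PROOFS =====

-- First-match lookup in an association list, as Dict.getD performs it.
lemma dict_getD_cons (k : String) (v : String) (rest : List (String × String))
    (a dflt : String) :
    (PySem.Dict.mk ((k, v) :: rest)).getD a dflt =
      if a = k then v else (PySem.Dict.mk rest).getD a dflt := by
  by_cases h : a = k
  · simp [PySem.Dict.getD, PySem.Dict.get?, h]
  · have hk : (k == a) = false := by simp; exact fun e => h e.symm
    simp [PySem.Dict.getD, PySem.Dict.get?, List.find?, hk, h]

-- Looking up in the pairs obtained by flattening one category block:
lemma getD_block (c : String) (a : String) :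
    ∀ (apps : List String) (rest : List (String × String)),
      (PySem.Dict.mk ((apps.map (fun x => (x, c))) ++ rest)).getD a "other" =
        if a ∈ apps then c else (PySem.Dict.mk rest).getD a "other" := by
  intro apps
  induction apps with
  | nil => intro rest; simp
  | cons x xs ih =>
      intro rest
      rw [List.map_cons, List.cons_append, dict_getD_cons, ih]
      by_cases h : a = x <;> simp [h, List.mem_cons]

-- The flat table is the flattening of A's categories dict.
lemma pvAppCategory_eq_flatten :
    pvAppCategory =
      PySem.Dict.mk (pvCategories.flatMap (fun p => p.2.map (fun x => (x, p.1)))) := rfl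

-- A's scan over the nested dict equals first-match lookup in the flattened pairs.
lemma scan_eq_flat_lookup (a : String) :
    ∀ (cats : List (String × List String)),
      pvScanA a cats =
        (PySem.Dict.mk (cats.flatMap (fun p => p.2.map (fun x => (x, p.1))))).getD a "other" := by
  intro cats
  induction cats with
  | nil => simp [pvScanA, PySem.Dict.getD, PySem.Dict.get?]
  | cons p rest ih =>
      obtain ⟨c, apps⟩ := p
      rw [List.flatMap_cons, getD_block]
      simp only [pvScanA, ih]

-- ===== VERDICT =====
theorem get_app_category_py_spec : Claim_equal_get_app_category_py := by
  intro a _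
  unfold Spec_get_app_category_py get_app_category_py get_app_category_py_alt
  rw [pvAppCategory_eq_flatten, scan_eq_flat_lookup]
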